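-- pv_equiv track=rewrite | github.com/zeropointnothing/pyBox | tedi.py | evr_other
-- ===== SOURCE A (Python) =====
-- def evr_other(string: str) -> str:
--     """
--     Capitalizes every other letter in a string.
--     """
--     cap = True
--     output = ""
--     ## makes all characters lowercase so they can be flip-flopped
--     string = string.lower()
--
--     #Flip flops between True and False.
--     #If 'cap' is true, capitalize the letter and set 'cap' to False.
--     #If it is not, set 'cap' to True and move on
--     for char in string:
--         if cap is True:
--             output = output + char.capitalize()
--             cap = False
--         else:
--             output = output + char
--             cap = True
--     return output
-- ===== SOURCE B (Python) =====
-- def evr_other(string: str) -> str: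
--     chars = list(string.lower())
--     chars[0::2] = [c.upper() for c in chars[0::2]]
--     return "".join(chars)
-- ===== Notes on version B (the rewrite author's own statement) =====
-- stated objective: simpler
-- what changed: Replaces the boolean flip-flop state machine with string concatenation by a slice-based transform: lowercase, uppercase the even-indexed slice chars[0::2] as a group, and join the reassembled list.
import Mathlib
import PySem

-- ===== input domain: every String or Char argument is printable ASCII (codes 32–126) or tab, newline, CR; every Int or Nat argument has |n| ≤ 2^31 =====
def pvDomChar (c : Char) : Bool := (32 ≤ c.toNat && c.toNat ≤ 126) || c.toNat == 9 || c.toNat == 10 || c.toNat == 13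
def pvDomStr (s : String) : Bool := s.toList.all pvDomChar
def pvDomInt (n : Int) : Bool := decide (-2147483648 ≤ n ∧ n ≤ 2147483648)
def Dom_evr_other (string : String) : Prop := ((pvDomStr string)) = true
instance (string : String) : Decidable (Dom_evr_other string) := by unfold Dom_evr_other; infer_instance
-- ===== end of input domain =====

-- B replaces A's per-character flip-flop accumulator with a slice-group transform
-- (uppercase chars[0::2] as a block, then reassemble); objective: simpler.

-- ===== PORT A =====
-- char.capitalize() on a one-character string uppercases that character;
-- for single Chars this is exactly PySem.Chars.upperChar (exact on ASCII and beyond for single chars).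
def evr_other (string : String) : String :=
  ((PySem.Str.lower string).toList.foldl
    (fun (st : Bool × String) c =>
      if st.1 = true then (false, st.2 ++ String.ofList [PySem.Chars.upperChar c])
      else (true, st.2 ++ String.ofList [c]))
    (true, "")).2

-- ===== PORT B =====
-- l[0::2] : every second element starting at index 0 (hand-ported; PySem slices have step 1)
def pvEvery2 : List Char → List Char
  | [] => []
  | [c] => [c]
  | c :: _ :: t => c :: pvEvery2 t

-- the slice assignment chars[0::2] = xs : xs go to the even positions, ys stay at the odd ones
def pvInterleave : List Char → List Char → List Char
  | [], ys => ys
  | x :: xs, ys => x :: pvInterleave ys xs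
termination_by xs ys => xs.length + ys.length
decreasing_by simp; omega

def evr_other_alt (string : String) : String :=
  let chars := (PySem.Str.lower string).toList
  String.ofList (pvInterleave ((pvEvery2 chars).map PySem.Chars.upperChar) (pvEvery2 chars.tail))

-- ===== PRECONDITION & SPEC =====
def Spec_evr_other (string : String) (out : String) : Prop := out = evr_other_alt string
instance (string : String) (out : String) : Decidable (Spec_evr_other string out) := by unfold Spec_evr_other; infer_instance

-- ===== CLAIM (what is proved, stated in full; the proofs are below) =====
def Claim_equal_evr_other : Prop := ∀ (string : String), Dom_evr_other string → Spec_evr_other string (evr_other string)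

-- ===== LEMMAS AND PROOFS =====

-- what A's flip-flop loop produces, as a list-level function
def pvChA : Bool → List Char → List Char
  | _, [] => []
  | true, c :: t => PySem.Chars.upperChar c :: pvChA false t
  | false, c :: t => c :: pvChA true t

theorem pvFoldA (l : List Char) (cap : Bool) (acc : String) :
    ((l.foldl
      (fun (st : Bool × String) c =>
        if st.1 = true then (false, st.2 ++ String.ofList [PySem.Chars.upperChar c])
        else (true, st.2 ++ String.ofList [c]))
      (cap, acc)).2).toList = acc.toList ++ pvChA cap l := by
  induction l generalizing cap acc with
  | nil => simp [pvChA]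
  | cons c t ih =>
    cases cap <;> simp [List.foldl, pvChA, ih, String.toList_ofList]

theorem pvChA_eq (l : List Char) :
    pvChA true l = pvInterleave ((pvEvery2 l).map PySem.Chars.upperChar) (pvEvery2 l.tail) := by
  induction l using pvEvery2.induct with
  | case1 => simp [pvChA, pvEvery2, pvInterleave]
  | case2 c => simp [pvChA, pvEvery2, pvInterleave]
  | case3 c d t ih =>
    cases t with
    | nil => simp [pvChA, pvEvery2, pvInterleave]
    | cons e t' =>
      simp [pvChA] at ih
      simp [pvChA, pvEvery2, pvInterleave, ih]

-- ===== VERDICT (by name: the statement is the Claim_ definition above) =====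
theorem evr_other_spec : Claim_equal_evr_other := by
  intro s _
  unfold Spec_evr_other evr_other evr_other_alt
  apply String.toList_injective
  simp [pvFoldA, pvChA_eq, String.toList_ofList]
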